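-- pv_equiv track=rewrite | github.com/tsua0002/syracuse | src/syracuse/analysis.py | _zero_run_lengths
-- ===== SOURCE A (Python) =====
-- def _zero_run_lengths(parity_word: str) -> tuple[int, ...]:
--     runs = []
--     current_run = 0
--
--     for bit in parity_word:
--         if bit == "0":
--             current_run += 1
--         elif current_run:
--             runs.append(current_run)
--             current_run = 0
--
--     if current_run:
--         runs.append(current_run)
--
--     return tuple(runs)
-- ===== SOURCE B (Python) =====
-- def _zero_run_lengths(parity_word: str) -> tuple[int, ...]:
--     # Normalize: keep '0's, turn every other character into a space, then let
--     # str.split() carve out the maximal '0'-runs in one pass.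
--     normalized = "".join(c if c == "0" else " " for c in parity_word)
--     return tuple(len(run) for run in normalized.split())
-- ===== Notes on version B (the rewrite author's own statement) =====
-- stated objective: idiomatic
-- what changed: Replaces the hand-maintained run counter and flush logic with a normalize-then-split pipeline: map every separator character to a space and let str.split() produce the maximal zero-runs, whose lengths are returned.
import Mathlib
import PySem

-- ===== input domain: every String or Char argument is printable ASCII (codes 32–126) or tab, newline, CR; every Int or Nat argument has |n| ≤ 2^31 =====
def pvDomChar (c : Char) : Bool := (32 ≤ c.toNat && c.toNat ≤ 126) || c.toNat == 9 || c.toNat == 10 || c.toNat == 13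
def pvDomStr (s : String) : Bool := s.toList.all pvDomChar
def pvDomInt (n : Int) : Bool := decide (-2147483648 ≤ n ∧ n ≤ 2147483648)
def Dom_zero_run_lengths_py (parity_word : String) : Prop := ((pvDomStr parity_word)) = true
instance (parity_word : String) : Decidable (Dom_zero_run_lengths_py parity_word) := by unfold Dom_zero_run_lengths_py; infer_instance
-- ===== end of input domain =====

-- B replaces A's hand-maintained run counter with a normalize-then-split pipeline (map non-'0' chars
-- to spaces, str.split(), take lengths) — objective: idiomatic, same cost.

-- ===== PORT A =====
def zero_run_lengths_py (parity_word : String) : List Int :=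
  let st := parity_word.toList.foldl
    (fun (p : List Int × Int) bit =>
      if bit = '0' then (p.1, p.2 + 1)
      else if p.2 ≠ 0 then (p.1 ++ [p.2], 0)
      else p)
    ([], 0)
  if st.2 ≠ 0 then st.1 ++ [st.2] else st.1

-- ===== PORT B =====
-- "".join(c if c == "0" else " " for c in parity_word), then split() and map len.
def zero_run_lengths_py_alt (parity_word : String) : List Int :=
  let normalized : String :=
    PySem.Str.join "" (parity_word.toList.map (fun c => if c = '0' then String.ofList [c] else " "))
  (PySem.Str.split₀ normalized).map (fun run => PySem.Str.len run)

-- ===== PRECONDITION & SPEC =====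
def Spec_zero_run_lengths_py (parity_word : String) (out : List Int) : Prop := out = zero_run_lengths_py_alt parity_word
instance (parity_word : String) (out : List Int) : Decidable (Spec_zero_run_lengths_py parity_word out) := by unfold Spec_zero_run_lengths_py; infer_instance

-- ===== CLAIM (what is proved, stated in full; the proofs are below) =====
def Claim_equal_zero_run_lengths_py : Prop := ∀ (parity_word : String), Dom_zero_run_lengths_py parity_word → Spec_zero_run_lengths_py parity_word (zero_run_lengths_py parity_word)

-- ===== LEMMAS AND PROOFS =====

-- Common characterisation: run lengths of cs with a pending run of `cur` zeros already seen.
def runAcc : Int → List Char → List Int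
  | cur, [] => if cur ≠ 0 then [cur] else []
  | cur, c :: cs => if c = '0' then runAcc (cur + 1) cs
      else if cur ≠ 0 then cur :: runAcc 0 cs else runAcc 0 cs

theorem portA_eq_runAcc (cs : List Char) : ∀ (runs : List Int) (cur : Int),
    (let st := cs.foldl
        (fun (p : List Int × Int) bit =>
          if bit = '0' then (p.1, p.2 + 1)
          else if p.2 ≠ 0 then (p.1 ++ [p.2], 0)
          else p) (runs, cur);
      if st.2 ≠ 0 then st.1 ++ [st.2] else st.1) = runs ++ runAcc cur cs := by
  induction cs with
  | nil => intro runs cur; simp [runAcc]; split_ifs <;> simp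
  | cons c cs ih =>
    intro runs cur
    by_cases hc : c = '0'
    · simpa [hc, runAcc] using ih runs (cur + 1)
    · rcases eq_or_ne cur 0 with hz | hz
      · subst hz; simpa [hc, runAcc] using ih runs 0
      · simpa [hc, hz, runAcc, List.append_assoc] using ih (runs ++ [cur]) 0

theorem go_eq_runAcc (cs : List Char) : ∀ (cur : List Char) (acc : List (List Char)),
    (PySem.Chars.split₀.go (cs.map (fun c => if c = '0' then c else ' ')) cur acc).map
        (fun w => (w.length : Int))
      = acc.reverse.map (fun w => (w.length : Int)) ++ runAcc (cur.length : Int) cs := by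
  induction cs with
  | nil =>
    intro cur acc
    rcases cur with _ | ⟨x, xs⟩
    · simp [PySem.Chars.split₀.go, runAcc]
    · simp [PySem.Chars.split₀.go, runAcc]
      omega
  | cons c cs ih =>
    intro cur acc
    by_cases hc : c = '0'
    · have h0 : PySem.Chars.isspace '0' = false := by decide
      have hih := ih ('0' :: cur) acc
      simp [hc, PySem.Chars.split₀.go, h0] at hih ⊢
      rw [hih]
      simp [runAcc]
    · have hsp : PySem.Chars.isspace ' ' = true := by decide
      rcases cur with _ | ⟨x, xs⟩
      · have hih := ih [] acc
        simpa [hc, PySem.Chars.split₀.go, hsp, runAcc] using hih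
      · have hih := ih [] ((x :: xs).reverse :: acc)
        simp [hc, PySem.Chars.split₀.go, hsp] at hih ⊢
        rw [hih]
        have h1 : ¬((1 : Int) + (xs.length : Int) = 0) := by omega
        have h2 : ¬((xs.length : Int) + 1 = 0) := by omega
        simp [runAcc, hc, h2]

-- the normalized string's characters
theorem normalized_toList (cs : List Char) :
    (PySem.Str.join "" (cs.map (fun c => if c = '0' then String.ofList [c] else " "))).toList
      = cs.map (fun c => if c = '0' then c else ' ') := by
  have hmap : cs.map (String.toList ∘ fun c => if c = '0' then String.ofList [c] else " ")
      = (cs.map (fun c => if c = '0' then c else ' ')).map (fun c => [c]) := by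
    rw [List.map_map]
    refine List.map_congr_left ?_
    intro c _
    by_cases hc : c = '0' <;> simp [hc]
  simp only [PySem.Str.join, String.toList_ofList, List.map_map]
  rw [List.map_map] at hmap
  rw [hmap]
  simpa using PySem.Chars.join_nil_singletons (cs.map (fun c => if c = '0' then c else ' '))

theorem portB_eq_runAcc (s : String) : zero_run_lengths_py_alt s = runAcc 0 s.toList := by
  unfold zero_run_lengths_py_alt
  simp only [PySem.Str.split₀, normalized_toList, List.map_map]
  have hgo := go_eq_runAcc s.toList [] []
  simp only [PySem.Chars.split₀] at hgo ⊢
  simp only [List.reverse_nil, List.map_nil, List.nil_append, List.length_nil,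
    Nat.cast_zero] at hgo
  rw [← hgo]
  refine List.map_congr_left ?_
  intro w _
  simp

-- ===== VERDICT (by name: the statement is the Claim_ definition above) =====
theorem zero_run_lengths_py_spec : Claim_equal_zero_run_lengths_py := by
  intro s _
  unfold Spec_zero_run_lengths_py
  rw [portB_eq_runAcc]
  unfold zero_run_lengths_py
  simpa using portA_eq_runAcc s.toList [] 0
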